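-- pv_equiv track=rewrite | github.com/vikyme/Smart-Dictionary | dict.py | mod
-- ===== SOURCE A (Python) =====
-- def mod(temp,str):
--     index=0
--     a=[]
--     for i in range(5):
--         if (temp[i][0][0]==str[0]):
--             a.append(i)
--     b=[]
--     for i in range(5):
--         if (i not in a):
--             a.append(i)
--     for i in range(5):
--         b.append(temp[a[i]])
--     return(b)
-- ===== SOURCE B (Python) =====
-- def mod(temp, str):
--     # One pass: partition the first five entries directly (index via range(5))
--     matched = []
--     unmatched = []
--     for i in range(5):
--         if temp[i][0][0] == str[0]:
--             matched.append(temp[i])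
--         else:
--             unmatched.append(temp[i])
--     return matched + unmatched
-- ===== Notes on version B (the rewrite author's own statement) =====
-- stated objective: simpler
-- what changed: B partitions the first five entries into matched/unmatched lists in a single pass and concatenates them, dropping A's index-permutation list and its two extra gather loops.
import Mathlib
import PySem

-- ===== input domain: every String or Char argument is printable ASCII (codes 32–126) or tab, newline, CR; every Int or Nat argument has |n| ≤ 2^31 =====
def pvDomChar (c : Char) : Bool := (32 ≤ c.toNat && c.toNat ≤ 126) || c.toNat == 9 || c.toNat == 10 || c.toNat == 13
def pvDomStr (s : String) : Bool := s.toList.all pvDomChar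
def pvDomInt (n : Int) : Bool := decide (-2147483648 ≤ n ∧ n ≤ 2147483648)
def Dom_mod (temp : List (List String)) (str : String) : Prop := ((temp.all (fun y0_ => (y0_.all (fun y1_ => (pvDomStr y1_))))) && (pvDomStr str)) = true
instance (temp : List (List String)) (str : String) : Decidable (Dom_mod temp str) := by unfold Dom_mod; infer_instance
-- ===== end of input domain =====

-- B replaces A's index-permutation list and its three loops by one direct partition pass; objective: simpler.

-- ===== PORT A =====
-- temp[i][0][0] == str[0]  (indexing through defaults; exact under Pre_mod, which puts every index in range)
def pvCond (temp : List (List String)) (str : String) (i : Int) : Bool :=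
  PySem.Str.pyGet? (PySem.List.pyGetD (PySem.List.pyGetD temp i []) 0 "") 0 == PySem.Str.pyGet? str 0

def mod (temp : List (List String)) (str : String) : List (List String) :=
  let a : List Int :=
    (PySem.List.pyRange 0 5 1).foldl (fun a i => if pvCond temp str i then a ++ [i] else a) []
  let a : List Int :=
    (PySem.List.pyRange 0 5 1).foldl (fun a i => if i ∈ a then a else a ++ [i]) a
  (PySem.List.pyRange 0 5 1).foldl
    (fun b i => b ++ [PySem.List.pyGetD temp (PySem.List.pyGetD a i 0) []]) []

-- ===== PORT B =====
def mod_alt (temp : List (List String)) (str : String) : List (List String) :=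
  let mu :=
    (PySem.List.pyRange 0 5 1).foldl
      (fun (mu : List (List String) × List (List String)) i =>
        if pvCond temp str i then (mu.1 ++ [PySem.List.pyGetD temp i []], mu.2)
        else (mu.1, mu.2 ++ [PySem.List.pyGetD temp i []]))
      ([], [])
  mu.1 ++ mu.2

-- ===== PRECONDITION & SPEC =====
-- Pre_mod: exactly the inputs where A returns (no IndexError): at least 5 rows, each of the
-- first five rows nonempty with a nonempty first string, and str nonempty.
def Pre_mod (temp : List (List String)) (str : String) : Prop :=
  5 ≤ temp.length ∧ str.toList ≠ [] ∧
    ∀ r ∈ temp.take 5, r ≠ [] ∧ (r.headD "").toList ≠ []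
instance (temp : List (List String)) (str : String) : Decidable (Pre_mod temp str) := by
  unfold Pre_mod; infer_instance
def pvWitness_mod : List (List String) × String :=
  ([["ax"], ["b"], ["ac"], ["c"], ["a"]], "a")
def Spec_mod (temp : List (List String)) (str : String) (out : List (List String)) : Prop := out = mod_alt temp str
instance (temp : List (List String)) (str : String) (out : List (List String)) : Decidable (Spec_mod temp str out) := by unfold Spec_mod; infer_instance

-- ===== CLAIM (what is proved, stated in full; the proofs are below) =====
def Claim_equal_mod : Prop := ∀ (temp : List (List String)) (str : String), Dom_mod temp str → Pre_mod temp str → Spec_mod temp str (mod temp str)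

-- ===== LEMMAS AND PROOFS =====
theorem pyRange5 : PySem.List.pyRange 0 5 1 = [0, 1, 2, 3, 4] := by decide

-- ===== VERDICT (by name: the statement is the Claim_ definition above) =====
theorem mod_spec : Claim_equal_mod := by
  intro temp str _ _
  unfold Spec_mod mod mod_alt
  rw [pyRange5]
  by_cases h0 : pvCond temp str 0 <;> by_cases h1 : pvCond temp str 1 <;>
    by_cases h2 : pvCond temp str 2 <;> by_cases h3 : pvCond temp str 3 <;>
    by_cases h4 : pvCond temp str 4 <;>
  simp [h0, h1, h2, h3, h4, PySem.List.pyGetD]
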